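-- pv_equiv track=rewrite | github.com/HumanCompatibleAI/interactive-behaviour-design | utils.py | split_preserving_seps
-- ===== SOURCE A (Python) =====
-- def split_preserving_seps(s, seps=('_', '-')):
--     """
--     'foo-bar_1' => ['foo', '-', 'bar', '_', '1']
--     """
--     arr = []
--     cur = ""
--     for c in s:
--         if c in seps:
--             if cur:
--                 arr.append(cur)
--             arr.append(c)
--             cur = ""
--         else:
--             cur += c
--     arr.append(cur)
--     return arr
-- ===== SOURCE B (Python) =====
-- def split_preserving_seps(s, seps=('_', '-')):
--     """
--     'foo-bar_1' => ['foo', '-', 'bar', '_', '1']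
--     """
--     out = []
--     i = 0
--     n = len(s)
--     while i < n:
--         if s[i] in seps:
--             out.append(s[i])
--             i += 1
--         else:
--             j = i
--             while j < n and s[j] not in seps:
--                 j += 1
--             out.append(s[i:j])
--             i = j
--     if not s or s[-1] in seps:
--         out.append('')
--     return out
-- ===== Notes on version B (the rewrite author's own statement) =====
-- stated objective: alternative
-- what changed: Replaces A's char-by-char accumulation into a cur buffer with a two-pointer run scan that emits each maximal non-separator run as one slice and each separator char as its own token, with a trailing empty token exactly when the input is empty or ends in a separator.
import Mathlib
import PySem

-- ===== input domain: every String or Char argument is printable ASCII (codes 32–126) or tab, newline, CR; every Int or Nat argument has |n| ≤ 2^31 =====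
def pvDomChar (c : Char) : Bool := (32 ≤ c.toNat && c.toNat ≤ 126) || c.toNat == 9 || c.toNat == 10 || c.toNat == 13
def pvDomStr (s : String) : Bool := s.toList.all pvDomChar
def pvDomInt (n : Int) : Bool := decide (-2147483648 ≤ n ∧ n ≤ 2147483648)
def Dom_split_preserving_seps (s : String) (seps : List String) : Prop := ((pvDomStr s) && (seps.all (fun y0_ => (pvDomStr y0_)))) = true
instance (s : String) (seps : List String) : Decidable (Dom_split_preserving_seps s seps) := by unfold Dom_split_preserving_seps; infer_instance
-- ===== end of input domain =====

-- B replaces A's char-by-char `cur` accumulator with a two-pointer run scan (whole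
-- non-separator runs are emitted as slices); objective: alternative decomposition.

-- Python `c in seps` for a character c: the 1-char string equals some element of seps.
def pvIsSep (seps : List String) (c : Char) : Bool := seps.contains (String.ofList [c])

-- ===== PORT A =====
-- fold state: (arr, cur) exactly as in A; the final `arr.append(cur)` afterwards.
def split_preserving_seps (s : String) (seps : List String) : List String :=
  let st := s.toList.foldl
    (fun (p : List String × List Char) c =>
      if pvIsSep seps c then
        ((if p.2.isEmpty then p.1 else p.1 ++ [String.ofList p.2]) ++ [String.ofList [c]], [])
      else (p.1, p.2 ++ [c]))
    ([], [])
  st.1 ++ [String.ofList st.2]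

-- ===== PORT B =====
-- run scan (Source B's while loop): a separator char is its own token; a maximal
-- non-separator run `s[i:j]` is one token.
def pvRunsB (seps : List String) : List Char → List String
  | [] => []
  | c :: rest =>
    if pvIsSep seps c then
      String.ofList [c] :: pvRunsB seps rest
    else
      let run := rest.takeWhile (fun d => !pvIsSep seps d)
      String.ofList (c :: run) :: pvRunsB seps (rest.drop run.length)
termination_by l => l.length
decreasing_by
  · simp
  · rw [List.length_drop]
    simp only [List.length_cons]
    omega

def split_preserving_seps_alt (s : String) (seps : List String) : List String :=
  let core := pvRunsB seps s.toList
  -- Source B: `if not s or s[-1] in seps: out.append('')`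
  match s.toList.getLast? with
  | none => core ++ [""]
  | some c => if pvIsSep seps c then core ++ [""] else core

-- ===== PRECONDITION & SPEC =====
def Spec_split_preserving_seps (s : String) (seps : List String) (out : List String) : Prop := out = split_preserving_seps_alt s seps
instance (s : String) (seps : List String) (out : List String) : Decidable (Spec_split_preserving_seps s seps out) := by unfold Spec_split_preserving_seps; infer_instance

-- ===== CLAIM (what is proved, stated in full; the proofs are below) =====
def Claim_equal_split_preserving_seps : Prop := ∀ (s : String) (seps : List String), Dom_split_preserving_seps s seps → Spec_split_preserving_seps s seps (split_preserving_seps s seps)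

-- ===== LEMMAS AND PROOFS =====

-- common recursive specification: the tokens A still emits given buffer `cur` and remaining input
def pvSpec (seps : List String) : List Char → List Char → List String
  | cur, [] => [String.ofList cur]
  | cur, c :: rest =>
    if pvIsSep seps c then
      (if cur.isEmpty then [] else [String.ofList cur]) ++ [String.ofList [c]] ++ pvSpec seps [] rest
    else pvSpec seps (cur ++ [c]) rest

-- A's fold computes pvSpec
theorem a_fold_spec (seps : List String) (l : List Char) :
    ∀ (arr : List String) (cur : List Char),
      (l.foldl
        (fun (p : List String × List Char) c =>
          if pvIsSep seps c then
            ((if p.2.isEmpty then p.1 else p.1 ++ [String.ofList p.2]) ++ [String.ofList [c]], [])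
          else (p.1, p.2 ++ [c]))
        (arr, cur)).1
      ++ [String.ofList (l.foldl
        (fun (p : List String × List Char) c =>
          if pvIsSep seps c then
            ((if p.2.isEmpty then p.1 else p.1 ++ [String.ofList p.2]) ++ [String.ofList [c]], [])
          else (p.1, p.2 ++ [c]))
        (arr, cur)).2]
      = arr ++ pvSpec seps cur l := by
  induction l with
  | nil => intro arr cur; simp [pvSpec]
  | cons c rest ih =>
    intro arr cur
    simp only [List.foldl_cons, pvSpec]
    by_cases h : pvIsSep seps c
    · simp only [h, if_true]
      rw [ih]
      by_cases hc : cur.isEmpty <;> simp [hc]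
    · simp only [h, if_false, Bool.false_eq_true]
      rw [ih]

theorem a_eq_spec (s : String) (seps : List String) :
    split_preserving_seps s seps = pvSpec seps [] s.toList := by
  have := a_fold_spec seps s.toList [] []
  simpa [split_preserving_seps] using this

-- pvSpec with a nonempty buffer: the buffer absorbs the leading non-separator run
theorem spec_nonempty (seps : List String) (l : List Char) :
    ∀ (cur : List Char), cur ≠ [] →
      pvSpec seps cur l =
        if (l.drop (l.takeWhile (fun d => !pvIsSep seps d)).length).isEmpty
        then [String.ofList (cur ++ l.takeWhile (fun d => !pvIsSep seps d))]
        else String.ofList (cur ++ l.takeWhile (fun d => !pvIsSep seps d))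
               :: pvSpec seps [] (l.drop (l.takeWhile (fun d => !pvIsSep seps d)).length) := by
  induction l with
  | nil => intro cur _; simp [pvSpec]
  | cons c rest ih =>
    intro cur hcur
    have hne : ¬ cur.isEmpty := by simpa [List.isEmpty_iff] using hcur
    by_cases h : pvIsSep seps c
    · simp [pvSpec, h, hne]
    · simp only [pvSpec, h, if_false, Bool.false_eq_true, List.takeWhile_cons]
      rw [ih (cur ++ [c]) (by simp)]
      simp

-- getLast? is unchanged by a drop that leaves the list nonempty
theorem getLast?_drop_ne_nil (l : List Char) (n : Nat) (h : l.drop n ≠ []) :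
    (l.drop n).getLast? = l.getLast? := by
  conv_rhs => rw [← List.take_append_drop n l]
  rw [List.getLast?_append_of_ne_nil _ h]

-- the trailing-"" token of Source B: present iff the string is empty or ends in a separator
def pvTrail (seps : List String) (l : List Char) : List String :=
  match l.getLast? with
  | none => [""]
  | some c => if pvIsSep seps c then [""] else []

theorem pvRunsB_nil (seps : List String) : pvRunsB seps [] = [] := by
  rw [pvRunsB]

theorem pvRunsB_cons_sep (seps : List String) (c : Char) (rest : List Char)
    (h : pvIsSep seps c = true) :
    pvRunsB seps (c :: rest) = String.ofList [c] :: pvRunsB seps rest := by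
  conv_lhs => rw [pvRunsB]
  simp [h]

theorem pvRunsB_cons_run (seps : List String) (c : Char) (rest : List Char)
    (h : ¬ pvIsSep seps c = true) :
    pvRunsB seps (c :: rest) =
      String.ofList (c :: rest.takeWhile (fun d => !pvIsSep seps d))
        :: pvRunsB seps (rest.drop (rest.takeWhile (fun d => !pvIsSep seps d)).length) := by
  conv_lhs => rw [pvRunsB]
  simp [h]

theorem spec_eq_b (seps : List String) : ∀ (l : List Char),
    pvSpec seps [] l = pvRunsB seps l ++ pvTrail seps l := by
  intro l
  induction hn : l.length using Nat.strong_induction_on generalizing l with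
  | _ n ih =>
  cases l with
  | nil => simp [pvSpec, pvRunsB_nil, pvTrail]
  | cons c rest =>
    by_cases h : pvIsSep seps c
    · have hrec := ih rest.length (by simp [← hn]) rest rfl
      simp only [pvSpec, h, if_true, List.isEmpty_nil]
      rw [hrec, pvRunsB_cons_sep seps c rest h]
      have ht : pvTrail seps (c :: rest) = pvTrail seps rest := by
        cases rest with
        | nil => simp [pvTrail, h]
        | cons d t => simp [pvTrail, List.getLast?_cons_cons]
      rw [ht]; simp
    · have hstep : pvSpec seps [] (c :: rest) = pvSpec seps [c] rest := by
        simp [pvSpec, h]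
      rw [hstep, spec_nonempty seps rest [c] (by simp)]
      have hruns : pvRunsB seps (c :: rest) =
          String.ofList (c :: rest.takeWhile (fun d => !pvIsSep seps d))
            :: pvRunsB seps (rest.drop (rest.takeWhile (fun d => !pvIsSep seps d)).length) := by
        exact pvRunsB_cons_run seps c rest h
      by_cases he : (rest.drop (rest.takeWhile (fun d => !pvIsSep seps d)).length).isEmpty
      · -- the whole remainder is one run: no trailing "" on either side
        have hrest : rest = rest.takeWhile (fun d => !pvIsSep seps d) := by
          have hp := List.takeWhile_prefix (l := rest) (fun d => !pvIsSep seps d)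
          have hlen : rest.length ≤ (rest.takeWhile (fun d => !pvIsSep seps d)).length := by
            have := List.isEmpty_iff.mp he
            have := congrArg List.length this
            simp only [List.length_drop, List.length_nil] at this
            omega
          exact (hp.eq_of_length (le_antisymm hp.length_le hlen)).symm
        have htl : pvTrail seps (c :: rest) = [] := by
          cases hx : (c :: rest).getLast? with
          | none => exact absurd (List.getLast?_eq_none_iff.mp hx) (by simp)
          | some x =>
            have hxmem : x ∈ c :: rest := List.mem_of_getLast? hx
            have hxns : ¬ pvIsSep seps x = true := by
              rcases List.mem_cons.mp hxmem with h1 | h2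
              · simpa [h1] using h
              · rw [hrest] at h2
                simpa using List.mem_takeWhile_imp h2
            simp [pvTrail, hx, hxns]
        rw [hruns, htl]
        have : pvRunsB seps (rest.drop (rest.takeWhile (fun d => !pvIsSep seps d)).length) = [] := by
          rw [List.isEmpty_iff.mp he, pvRunsB_nil]
        simp [he, this]
      · -- the remainder after the run is nonempty, recurse
        have hdne : rest.drop (rest.takeWhile (fun d => !pvIsSep seps d)).length ≠ [] := by
          simpa [List.isEmpty_iff] using he
        have hlt : (rest.drop (rest.takeWhile (fun d => !pvIsSep seps d)).length).length < n := by
          simp only [List.length_drop]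
          simp only [← hn, List.length_cons]
          omega
        have hrec := ih _ hlt (rest.drop (rest.takeWhile (fun d => !pvIsSep seps d)).length) rfl
        have htl : pvTrail seps (c :: rest)
            = pvTrail seps (rest.drop (rest.takeWhile (fun d => !pvIsSep seps d)).length) := by
          have hrne : rest ≠ [] := by
            intro hr; apply hdne; simp [hr]
          unfold pvTrail
          rw [getLast?_drop_ne_nil rest _ hdne,
            show (c :: rest) = [c] ++ rest from rfl,
            List.getLast?_append_of_ne_nil _ hrne]
        rw [hruns, hrec, htl]
        simp [he]

-- ===== VERDICT (by name: the statement is the Claim_ definition above) =====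
theorem split_preserving_seps_spec : Claim_equal_split_preserving_seps := by
  intro s seps _
  unfold Spec_split_preserving_seps split_preserving_seps_alt
  rw [a_eq_spec, spec_eq_b]
  cases hl : s.toList.getLast? with
  | none => simp [pvTrail, hl]
  | some c => by_cases hc : pvIsSep seps c <;> simp [pvTrail, hl, hc]
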